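-- pv_equiv track=rewrite | github.com/Meow1ng-cat/124_mambetov_timur | Middle_tasks_11-13/Work_with_texts.py | commonst_word
-- ===== SOURCE A (Python) =====
-- def commonst_word(word_list):
--
--     word_frequency_dict = {}
--
--     for i in word_list:
--         equal_word_count = 0
--         for j in word_list:
--             if i == j:
--                 equal_word_count += 1
--         word_frequency_dict[equal_word_count] = i
--
--     return word_frequency_dict[max(word_frequency_dict)]
-- ===== SOURCE B (Python) =====
-- def commonst_word(word_list):
--     counts = {}
--     best_count = 0
--     for w in word_list:
--         c = counts.get(w, 0) + 1
--         counts[w] = c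
--         if c >= best_count:
--             best_count = c
--             best_word = w
--     return best_word
-- ===== Notes on version B (the rewrite author's own statement) =====
-- stated objective: faster
-- what changed: Replaces A's quadratic per-element rescan and count-keyed dict with ONE forward pass that maintains a running count per word plus the current best (count, word), updating on >= so the latest qualifying word wins; no second scan and no max over the table.
-- outside the precondition, e.g. on commonst_word([]): A raises ValueError, B raises UnboundLocalError
import Mathlib
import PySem

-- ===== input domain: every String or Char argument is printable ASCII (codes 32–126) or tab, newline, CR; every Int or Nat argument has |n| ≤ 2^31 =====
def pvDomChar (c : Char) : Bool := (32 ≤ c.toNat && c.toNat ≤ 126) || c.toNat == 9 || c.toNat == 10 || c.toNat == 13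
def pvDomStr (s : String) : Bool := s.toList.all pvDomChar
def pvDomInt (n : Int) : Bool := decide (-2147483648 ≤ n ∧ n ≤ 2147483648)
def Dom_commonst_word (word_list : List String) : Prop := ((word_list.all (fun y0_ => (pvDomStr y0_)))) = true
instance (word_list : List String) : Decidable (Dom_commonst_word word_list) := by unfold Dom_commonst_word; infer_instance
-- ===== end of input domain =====

-- B replaces A's quadratic per-element rescan and count-keyed dict with ONE forward pass
-- that maintains a running count per word and the current best (count, word), updating on
-- ties so the latest qualifying word wins (objective: faster, O(n^2) -> O(n)).

-- ===== PORT A =====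
-- For each i the inner loop recounts i over the whole list; dict maps count -> word
-- (later words overwrite); result = value at the maximal key. The `.get? m` lookup
-- always succeeds on nonempty input (m is a key); the "" fallbacks are the excluded
-- empty-list case where Python's max({}) raises ValueError.
def commonst_word (word_list : List String) : String :=
  let d : PySem.Dict Int String := word_list.foldl (fun d i =>
    d.insert (word_list.foldl (fun acc j => if i == j then acc + 1 else acc) (0 : Int)) i)
    PySem.Dict.empty
  match PySem.List.max? d.keys (fun x => x) with
  | some m =>
    match d.get? m with
    | some w => w
    | none => ""
  | none => ""

-- ===== PORT B =====
-- One loop body: bump the running count of w, update best (count, word) when c >= best.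
def bStep (st : PySem.Dict String Int × Int × String) (w : String) :
    PySem.Dict String Int × Int × String :=
  let c := st.1.getD w 0 + 1
  if c ≥ st.2.1 then (st.1.insert w c, c, w) else (st.1.insert w c, st.2.1, st.2.2)

-- The "" seed for best_word is the excluded empty-list case (Python's best_word is
-- unassigned there and the return raises UnboundLocalError).
def commonst_word_alt (word_list : List String) : String :=
  (word_list.foldl bStep (PySem.Dict.empty, 0, "")).2.2

-- ===== PRECONDITION & SPEC =====
-- On [] Python raises in both A (ValueError from max) and B (UnboundLocalError).
def Pre_commonst_word (word_list : List String) : Prop := word_list ≠ []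
instance (word_list : List String) : Decidable (Pre_commonst_word word_list) := by
  unfold Pre_commonst_word; infer_instance
def pvWitness_commonst_word : List String := ["a", "b", "a"]
def Spec_commonst_word (word_list : List String) (out : String) : Prop := out = commonst_word_alt word_list
instance (word_list : List String) (out : String) : Decidable (Spec_commonst_word word_list out) := by unfold Spec_commonst_word; infer_instance

-- ===== CLAIM (what is proved, stated in full; the proofs are below) =====
def Claim_equal_commonst_word : Prop := ∀ (word_list : List String), Dom_commonst_word word_list → Pre_commonst_word word_list → Spec_commonst_word word_list (commonst_word word_list)

-- ===== LEMMAS AND PROOFS =====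

-- Lookup in a dict built by an insert loop = last matching insertion, else the start dict.
lemma get?_foldl_insert_key (k : String → Int) (l : List String) (d : PySem.Dict Int String)
    (c : Int) :
    (l.foldl (fun d i => d.insert (k i) i) d).get? c =
      (l.reverse.find? (fun i => k i == c)).or (d.get? c) := by
  induction l generalizing d with
  | nil => simp
  | cons x t ih =>
      simp only [List.foldl_cons, ih, List.reverse_cons, List.find?_append]
      rw [PySem.Dict.get?_insert]
      cases h : t.reverse.find? (fun i => k i == c) with
      | some w => simp [Option.or]
      | none =>
          simp only [Option.or, List.find?_cons, List.find?_nil]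
          by_cases hc : c = k x
          · simp [hc]
          · have : (k x == c) = false := by simp; omega
            simp [this, hc]

-- counter (p ++ [x]) as one more insert on counter p.
lemma counter_snoc (p : List String) (x : String) :
    (PySem.Dict.counter p).insert x ((p.count x : Int) + 1)
      = PySem.Dict.counter (p ++ [x]) := by
  rw [← PySem.Dict.getD_counter p x,
      ← PySem.Dict.foldl_insert_getD_add_one_eq_counter p,
      ← PySem.Dict.foldl_insert_getD_add_one_eq_counter (p ++ [x]),
      List.foldl_append]
  simp [List.foldl]

-- count in p ++ [x] as an Int, split on whether the word is x.
lemma count_snoc_int (p : List String) (x i : String) :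
    (((p ++ [x]).count i : Int)) = (p.count i : Int) + (if x = i then 1 else 0) := by
  by_cases h : x = i
  · subst h; simp [List.count_append]
  · simp [List.count_append, h]

-- Loop invariant of B's single pass: after processing prefix p, the state is
-- (counter p, max count in p, last word of p whose count in p equals that max).
lemma bfold_inv (s : List String) : ∀ (p : List String) (b : Int) (w : String),
    (∀ i ∈ p, ((p.count i : Int)) ≤ b) →
    (∃ i ∈ p, ((p.count i : Int)) = b) →
    p.reverse.find? (fun i => ((p.count i : Int) == b)) = some w →
    (∀ i ∈ p ++ s, (((p ++ s).count i : Int)) ≤ (s.foldl bStep (PySem.Dict.counter p, b, w)).2.1) ∧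
    (∃ i ∈ p ++ s, (((p ++ s).count i : Int)) = (s.foldl bStep (PySem.Dict.counter p, b, w)).2.1) ∧
    (p ++ s).reverse.find?
        (fun i => (((p ++ s).count i : Int) == (s.foldl bStep (PySem.Dict.counter p, b, w)).2.1))
      = some (s.foldl bStep (PySem.Dict.counter p, b, w)).2.2 := by
  induction s with
  | nil =>
      intro p b w hub hach hw
      simpa using ⟨hub, hach, hw⟩
  | cons x s ih =>
      intro p b w hub hach hw
      simp only [List.foldl_cons]
      have hstep : bStep (PySem.Dict.counter p, b, w) x =
          (PySem.Dict.counter (p ++ [x]),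
            if ((p.count x : Int) + 1) ≥ b then ((p.count x : Int) + 1, x) else (b, w)) := by
        simp only [bStep, PySem.Dict.getD_counter, counter_snoc]
        split_ifs <;> rfl
      by_cases hc : ((p.count x : Int) + 1) ≥ b
      · -- new best: (count x in p) + 1, word x
        rw [hstep, if_pos hc]
        have h1 : ∀ i ∈ p ++ [x], (((p ++ [x]).count i : Int)) ≤ (p.count x : Int) + 1 := by
          intro i hi
          rw [count_snoc_int]
          by_cases h : x = i
          · subst h; simp
          · rw [if_neg h]
            have hip : i ∈ p := by
              rcases List.mem_append.mp hi with h' | h'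
              · exact h'
              · simp at h'; exact absurd h'.symm h
            have := hub i hip; omega
        have h2 : ∃ i ∈ p ++ [x], (((p ++ [x]).count i : Int)) = (p.count x : Int) + 1 := by
          refine ⟨x, by simp, ?_⟩
          rw [count_snoc_int]; simp
        have hx : (((p ++ [x]).count x : Int) == (p.count x : Int) + 1) = true := by
          rw [count_snoc_int]; simp
        have h3 : (p ++ [x]).reverse.find?
            (fun i => (((p ++ [x]).count i : Int) == (p.count x : Int) + 1)) = some x := by
          simp only [List.reverse_append, List.reverse_singleton, List.singleton_append,
            List.find?_cons, hx]
        have := ih (p ++ [x]) ((p.count x : Int) + 1) x h1 h2 h3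
        simpa [List.append_assoc] using this
      · -- best unchanged
        rw [hstep, if_neg hc]
        have hcount_lt : (p.count x : Int) + 1 < b := by omega
        have h1 : ∀ i ∈ p ++ [x], (((p ++ [x]).count i : Int)) ≤ b := by
          intro i hi
          rw [count_snoc_int]
          by_cases h : x = i
          · subst h; rw [if_pos rfl]; omega
          · rw [if_neg h]
            have hip : i ∈ p := by
              rcases List.mem_append.mp hi with h' | h'
              · exact h'
              · simp at h'; exact absurd h'.symm h
            have := hub i hip; omega
        have h2 : ∃ i ∈ p ++ [x], (((p ++ [x]).count i : Int)) = b := by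
          obtain ⟨y, hy, hyc⟩ := hach
          have hyx : ¬ x = y := by
            intro h; subst h; omega
          refine ⟨y, by simp [hy], ?_⟩
          rw [count_snoc_int, if_neg hyx]; omega
        have hpred : (fun i => (((p ++ [x]).count i : Int) == b))
            = (fun i => ((p.count i : Int) == b)) := by
          funext i
          rw [count_snoc_int]
          by_cases h : x = i
          · subst h
            rw [if_pos rfl]
            have hl' : ((p.count x : Int) + 1 == b) = false := by simp; omega
            have hr' : ((p.count x : Int) == b) = false := by simp; omega
            rw [hl', hr']
          · rw [if_neg h, add_zero]
        have hx : ((p.count x : Int) == b) = false := by simp; omega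
        have h3 : (p ++ [x]).reverse.find?
            (fun i => (((p ++ [x]).count i : Int) == b)) = some w := by
          rw [hpred]
          simp only [List.reverse_append, List.reverse_singleton, List.singleton_append,
            List.find?_cons, hx]
          exact hw
        have := ih (p ++ [x]) b w h1 h2 h3
        simpa [List.append_assoc] using this

theorem commonst_word_spec : Claim_equal_commonst_word := by
  intro l _ hpre
  obtain ⟨x, t, rfl⟩ : ∃ x t, l = x :: t := by
    cases l with
    | nil => exact absurd rfl hpre
    | cons x t => exact ⟨x, t, rfl⟩
  set l := x :: t with hl
  -- B's first step from the seed state = the invariant state of the prefix [x]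
  have hgetD0 : (PySem.Dict.empty : PySem.Dict String Int).getD x 0 = 0 := by
    rw [show (PySem.Dict.empty : PySem.Dict String Int) = PySem.Dict.counter [] from rfl,
        PySem.Dict.getD_counter]
    simp
  have hfirst : bStep (PySem.Dict.empty, 0, "") x = (PySem.Dict.counter [x], 1, x) := by
    have h1 : PySem.Dict.counter [x]
        = (PySem.Dict.empty : PySem.Dict String Int).insert x
            ((PySem.Dict.empty : PySem.Dict String Int).getD x 0 + 1) := by
      rw [← PySem.Dict.foldl_insert_getD_add_one_eq_counter [x]]; simp [List.foldl]
    simp only [bStep, h1, hgetD0]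
    norm_num
  have hinv := bfold_inv t [x] 1 x
    (by intro i hi; simp at hi; subst hi; simp)
    (⟨x, by simp, by simp⟩)
    (by simp)
  obtain ⟨hub, hach, hw⟩ := hinv
  have hBval : commonst_word_alt l = (t.foldl bStep (PySem.Dict.counter [x], 1, x)).2.2 := by
    unfold commonst_word_alt
    rw [hl, List.foldl_cons, hfirst]
  set b := (t.foldl bStep (PySem.Dict.counter [x], 1, x)).2.1 with hb
  set wB := (t.foldl bStep (PySem.Dict.counter [x], 1, x)).2.2 with hwB
  have hls : ([x] ++ t) = l := rfl
  rw [hls] at hub hach hw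
  -- now the A side
  unfold Spec_commonst_word commonst_word
  dsimp only
  have hinner : ∀ i : String,
      l.foldl (fun acc j => if i == j then acc + 1 else acc) (0 : Int) = (l.count i : Int) := by
    intro i
    have h1 : l.foldl (fun acc j => if i == j then acc + 1 else acc) (0 : Int)
        = l.foldl (fun acc j => if j == i then acc + 1 else acc) (0 : Int) := by
      apply PySem.List.foldl_congr_mem
      intro acc y _
      by_cases h : i = y
      · subst h; rfl
      · simp [beq_iff_eq, h, Ne.symm h]
    rw [h1, PySem.List.foldl_beq_add_one, zero_add]
  have hfA : l.foldl (fun d i =>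
        d.insert (l.foldl (fun acc j => if i == j then acc + 1 else acc) (0 : Int)) i)
        (PySem.Dict.empty : PySem.Dict Int String)
      = l.foldl (fun d i => d.insert ((l.count i : Int)) i) PySem.Dict.empty := by
    apply PySem.List.foldl_congr_mem
    intro d i _
    rw [hinner i]
  rw [hfA]
  have hkeys : (l.foldl (fun d i => d.insert ((l.count i : Int)) i)
      (PySem.Dict.empty : PySem.Dict Int String)).keys
      = PySem.Set.ofList (l.map (fun i => (l.count i : Int))) := by
    rw [PySem.Dict.keys_foldl_insert_key (key := fun i => (l.count i : Int))
      (f := fun _ i => i)]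
    simp [PySem.Set.update, PySem.Set.ofList_eq_foldl]
  rw [hkeys]
  cases hmx : PySem.List.max? (PySem.Set.ofList (l.map (fun i => (l.count i : Int))))
      (fun x => x) with
  | none =>
      rw [PySem.List.max?_eq_none_iff] at hmx
      have : ((l.count x : Int)) ∈ PySem.Set.ofList (l.map (fun i => (l.count i : Int))) := by
        rw [PySem.Set.mem_ofList]
        exact List.mem_map.mpr ⟨x, by simp [hl], rfl⟩
      rw [hmx] at this
      simp at this
  | some m =>
      -- m is the same number as B's running maximum b
      have hmb : m = b := by
        have hmem := PySem.List.max?_mem hmx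
        rw [PySem.Set.mem_ofList] at hmem
        obtain ⟨y, hy, hyc⟩ := List.mem_map.mp hmem
        have h1 : m ≤ b := by rw [← hyc]; exact hub y hy
        obtain ⟨z, hz, hzc⟩ := hach
        have hzm : ((l.count z : Int)) ∈ PySem.Set.ofList (l.map (fun i => (l.count i : Int))) := by
          rw [PySem.Set.mem_ofList]
          exact List.mem_map.mpr ⟨z, hz, rfl⟩
        have h2 := PySem.List.max?_isMax hmx _ hzm
        simp only at h2
        omega
      subst hmb
      dsimp only
      rw [get?_foldl_insert_key (fun i => (l.count i : Int)) l PySem.Dict.empty b, hw]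
      simp [Option.or, hBval]
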